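-- pv_equiv track=rewrite | github.com/DiRAC-HPC/Essentials-Level | python/analyze.py | running_total
-- ===== SOURCE A (Python) =====
-- def running_total(sequence):
--     if (sequence == []):
--         return []
--     current = sequence[0]
--     total = current
--     totals = []
--     for next in sequence[1:]:
--         if (next <= current):
--             totals.append(total)
--             total = 0
--         total = total + next
--         current = next
--     totals.append(total)
--     return totals
-- ===== SOURCE B (Python) =====
-- def running_total(sequence):
--     if not sequence:
--         return []
--     runs = [[sequence[0]]]
--     for x in sequence[1:]:
--         if x <= runs[-1][-1]:
--             runs.append([x])
--         else:
--             runs[-1].append(x)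
--     return [sum(r[1:], r[0]) for r in runs]
-- ===== Notes on version B (the rewrite author's own statement) =====
-- stated objective: alternative
-- what changed: A's single fused loop (accumulator with in-place resets) is split into two passes: first group the sequence into maximal strictly increasing runs, then map each run to its seeded sum.
import Mathlib
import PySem

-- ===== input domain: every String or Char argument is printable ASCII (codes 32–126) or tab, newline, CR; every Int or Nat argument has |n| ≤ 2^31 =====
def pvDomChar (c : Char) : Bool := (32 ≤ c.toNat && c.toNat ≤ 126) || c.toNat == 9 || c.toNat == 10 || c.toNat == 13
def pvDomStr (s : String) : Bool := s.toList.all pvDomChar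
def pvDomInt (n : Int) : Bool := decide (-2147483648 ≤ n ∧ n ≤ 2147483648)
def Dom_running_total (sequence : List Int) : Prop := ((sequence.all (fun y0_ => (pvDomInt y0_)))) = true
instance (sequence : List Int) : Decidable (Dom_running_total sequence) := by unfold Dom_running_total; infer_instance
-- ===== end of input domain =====

-- B changes decomposition only: A's fused accumulator loop becomes a grouping pass into
-- maximal strictly increasing runs followed by a per-run seeded sum; same O(n) cost.

-- ===== PORT A =====
-- A's for-loop over sequence[1:], state (current, total, totals)
def running_total_loopA (current total : Int) (totals : List Int) : List Int → List Int
  | [] => totals ++ [total]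
  | next :: rest =>
    if next ≤ current then running_total_loopA next (0 + next) (totals ++ [total]) rest
    else running_total_loopA next (total + next) totals rest

def running_total (sequence : List Int) : List Int :=
  match sequence with
  | [] => []
  | x :: xs => running_total_loopA x x [] xs

-- ===== PORT B =====
-- grouping pass: current run accumulated in reverse (head = last appended element = runs[-1][-1])
def running_total_runsAux (prev : Int) (cur : List Int) : List Int → List (List Int)
  | [] => [cur.reverse]
  | x :: rest =>
    if x ≤ prev then cur.reverse :: running_total_runsAux x [x] rest
    else running_total_runsAux x (x :: cur) rest

-- sum(r[1:], r[0]) : fold of the tail seeded with the head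
def running_total_sumRun (r : List Int) : Int :=
  match r with
  | [] => 0
  | h :: t => t.foldl (· + ·) h

def running_total_alt (sequence : List Int) : List Int :=
  match sequence with
  | [] => []
  | x :: xs => (running_total_runsAux x [x] xs).map running_total_sumRun

-- ===== PRECONDITION & SPEC =====
def Spec_running_total (sequence : List Int) (out : List Int) : Prop := out = running_total_alt sequence
instance (sequence : List Int) (out : List Int) : Decidable (Spec_running_total sequence out) := by unfold Spec_running_total; infer_instance

-- ===== CLAIM (what is proved, stated in full; the proofs are below) =====
def Claim_equal_running_total : Prop := ∀ (sequence : List Int), Dom_running_total sequence → Spec_running_total sequence (running_total sequence)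

-- ===== LEMMAS AND PROOFS =====
theorem sumRun_eq_sum (r : List Int) : running_total_sumRun r = r.sum := by
  cases r with
  | nil => rfl
  | cons h t =>
    simp only [running_total_sumRun, List.sum_cons]
    induction t generalizing h with
    | nil => simp
    | cons y ys ih => simp [List.foldl_cons, ih]; ring

theorem loopA_eq_runs (xs : List Int) : ∀ (prev : Int) (cur totals : List Int),
    running_total_loopA prev cur.sum totals xs
      = totals ++ (running_total_runsAux prev cur xs).map running_total_sumRun := by
  induction xs with
  | nil =>
    intro prev cur totals
    simp [running_total_loopA, running_total_runsAux, sumRun_eq_sum]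
  | cons x rest ih =>
    intro prev cur totals
    simp only [running_total_loopA, running_total_runsAux]
    by_cases h : x ≤ prev
    · simp only [if_pos h]
      have := ih x [x] (totals ++ [cur.sum])
      simp only [List.sum_cons, List.sum_nil, add_zero] at this
      rw [show (0 : Int) + x = x by ring, this]
      simp [sumRun_eq_sum]
    · simp only [if_neg h]
      have := ih x (x :: cur) totals
      simp only [List.sum_cons] at this
      rw [show cur.sum + x = x + cur.sum by ring, this]

-- ===== VERDICT (by name: the statement is the Claim_ definition above) =====
theorem running_total_spec : Claim_equal_running_total := by
  intro sequence _
  unfold Spec_running_total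
  cases sequence with
  | nil => rfl
  | cons x xs =>
    simp only [running_total, running_total_alt]
    have := loopA_eq_runs xs x [x] []
    simpa using this
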